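-- pv_equiv track=rewrite | github.com/agairola/fuel-pricing-skill | skills/sydney-traffic/scripts/traffic.py | _road_matches
-- ===== SOURCE A (Python) =====
-- def _normalize(s: str) -> str:
--     """Lowercase and strip extra whitespace."""
--     return " ".join(s.lower().split())
--
-- def _road_matches(query: str, roads: list[str]) -> bool:
--     """Fuzzy match a road name query against a list of road names."""
--     q = _normalize(query)
--     for road in roads:
--         r = _normalize(road)
--         # Exact match
--         if q == r:
--             return True
--         # Substring match (e.g. "M5" matches "M5 East Motorway")
--         if q in r:
--             return True
--         # Word overlap
--         q_words = set(q.split())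
--         r_words = set(r.split())
--         if q_words and q_words & r_words:
--             return True
--     return False
-- ===== SOURCE B (Python) =====
-- def _normalize(s: str) -> str:
--     """Lowercase and strip extra whitespace."""
--     return " ".join(s.lower().split())
--
-- def _road_matches(query: str, roads: list[str]) -> bool:
--     """Fuzzy match: substring pass first, then one aggregated word-index pass."""
--     nq = _normalize(query)
--     normed = [_normalize(road) for road in roads]
--     # Pass 1: substring (subsumes exact equality).
--     if any(nq in r for r in normed):
--         return True
--     # Pass 2: word overlap against the union of all words of all roads.
--     q_words = set(nq.split())
--     if not q_words:
--         return False
--     all_words = set()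
--     for r in normed:
--         all_words.update(r.split())
--     return not q_words.isdisjoint(all_words)
-- ===== Notes on version B (the rewrite author's own statement) =====
-- stated objective: faster
-- what changed: Replaces the interleaved three-check loop (exact, substring, per-road query-word-set rebuild and intersection) by a substring pass over pre-normalized roads (which subsumes the exact-equality check) plus one aggregated union set of all roads' words intersected once with the query's word set, built once.
import Mathlib
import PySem

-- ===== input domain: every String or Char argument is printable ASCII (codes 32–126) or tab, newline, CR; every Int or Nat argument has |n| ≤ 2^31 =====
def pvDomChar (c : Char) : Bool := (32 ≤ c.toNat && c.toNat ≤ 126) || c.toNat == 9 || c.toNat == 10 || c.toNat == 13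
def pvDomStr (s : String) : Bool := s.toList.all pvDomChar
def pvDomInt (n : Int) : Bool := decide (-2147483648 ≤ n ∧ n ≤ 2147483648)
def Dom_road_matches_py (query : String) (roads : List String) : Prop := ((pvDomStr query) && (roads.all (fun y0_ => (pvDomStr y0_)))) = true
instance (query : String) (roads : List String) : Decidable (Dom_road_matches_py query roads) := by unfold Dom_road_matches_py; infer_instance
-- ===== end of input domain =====

-- B differs from A only in shape (two passes + one aggregated word union instead of one interleaved three-check loop); return values are proved equal on all inputs.

-- ===== PORT A =====
-- _normalize: " ".join(s.lower().split())
def pvNormA (s : String) : String :=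
  PySem.Str.join " " (PySem.Str.split₀ (PySem.Str.lower s))

-- the for-loop of _road_matches, with its three checks in order and early return
def pvLoopA (q : String) : List String → Bool
  | [] => false
  | road :: rest =>
    let r := pvNormA road
    if q == r then true
    else if PySem.Str.isIn q r then true
    else
      let qWords := PySem.Set.ofList (PySem.Str.split₀ q)
      let rWords := PySem.Set.ofList (PySem.Str.split₀ r)
      if !qWords.isEmpty && !(PySem.Set.inter qWords rWords).isEmpty then true
      else pvLoopA q rest

def road_matches_py (query : String) (roads : List String) : Bool :=
  pvLoopA (pvNormA query) roads

-- ===== PORT B =====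
def pvNormB (s : String) : String :=
  PySem.Str.join " " (PySem.Str.split₀ (PySem.Str.lower s))

def road_matches_py_alt (query : String) (roads : List String) : Bool :=
  let nq := pvNormB query
  let normed := roads.map pvNormB
  if normed.any (fun r => PySem.Str.isIn nq r) then true
  else
    let qWords := PySem.Set.ofList (PySem.Str.split₀ nq)
    if qWords.isEmpty then false
    else
      let allWords := normed.foldl
        (fun s r => PySem.Set.update s (PySem.Str.split₀ r)) PySem.Set.empty
      !(PySem.Set.isdisjoint qWords allWords)

-- ===== PRECONDITION & SPEC =====
def Spec_road_matches_py (query : String) (roads : List String) (out : Bool) : Prop := out = road_matches_py_alt query roads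
instance (query : String) (roads : List String) (out : Bool) : Decidable (Spec_road_matches_py query roads out) := by unfold Spec_road_matches_py; infer_instance

-- ===== CLAIM (what is proved, stated in full; the proofs are below) =====
def Claim_equal_road_matches_py : Prop := ∀ (query : String) (roads : List String), Dom_road_matches_py query roads → Spec_road_matches_py query roads (road_matches_py query roads)

-- ===== LEMMAS AND PROOFS =====

theorem pvNormB_eq : pvNormB = pvNormA := rfl

theorem pvIfOr (b x : Bool) : (if b = true then true else x) = (b || x) := by
  cases b <;> simp

theorem pvIfAnd (b x : Bool) : (if b = true then false else x) = (!b && x) := by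
  cases b <;> simp

-- q == r implies q in r
theorem pvIsIn_of_eq (q r : String) (h : q = r) : PySem.Str.isIn q r = true := by
  subst h
  rw [PySem.Str.isIn_iff_infix]

-- membership in the aggregated union built by foldl update
theorem pvMem_foldl_update (w : String) (l : List String) (s : PySem.Set String) :
    w ∈ l.foldl (fun s r => PySem.Set.update s (PySem.Str.split₀ r)) s ↔
      w ∈ s ∨ ∃ r ∈ l, w ∈ PySem.Str.split₀ r := by
  induction l generalizing s with
  | nil => simp
  | cons a t ih =>
    simp only [List.foldl_cons, ih, PySem.Set.mem_update, List.mem_cons]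
    constructor
    · rintro (⟨h | h⟩ | ⟨r, hr, hw⟩)
      · exact Or.inl h
      · exact Or.inr ⟨a, Or.inl rfl, h⟩
      · exact Or.inr ⟨r, Or.inr hr, hw⟩
    · rintro (h | ⟨r, rfl | hr, hw⟩)
      · exact Or.inl (Or.inl h)
      · exact Or.inl (Or.inr hw)
      · exact Or.inr ⟨r, hr, hw⟩

-- the three checks of A's loop body, as one boolean per road
def pvCondA (q road : String) : Bool :=
  (q == pvNormA road) || PySem.Str.isIn q (pvNormA road) ||
    (!(PySem.Set.ofList (PySem.Str.split₀ q)).isEmpty &&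
      !(PySem.Set.inter (PySem.Set.ofList (PySem.Str.split₀ q))
        (PySem.Set.ofList (PySem.Str.split₀ (pvNormA road)))).isEmpty)

theorem pvLoopA_eq_any (q : String) (roads : List String) :
    pvLoopA q roads = roads.any (pvCondA q) := by
  induction roads with
  | nil => simp [pvLoopA]
  | cons a t ih =>
    show (if (q == pvNormA a) = true then true
      else if PySem.Str.isIn q (pvNormA a) = true then true
      else if (!(PySem.Set.ofList (PySem.Str.split₀ q)).isEmpty &&
          !(PySem.Set.inter (PySem.Set.ofList (PySem.Str.split₀ q))
            (PySem.Set.ofList (PySem.Str.split₀ (pvNormA a)))).isEmpty) = true then true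
      else pvLoopA q t) = (a :: t).any (pvCondA q)
    rw [pvIfOr, pvIfOr, pvIfOr, ih, List.any_cons]
    simp [pvCondA, Bool.or_assoc]

theorem pvInter_nonempty_iff (q r : String) :
    (!(PySem.Set.inter (PySem.Set.ofList (PySem.Str.split₀ q))
        (PySem.Set.ofList (PySem.Str.split₀ r))).isEmpty) = true ↔
      ∃ w ∈ PySem.Str.split₀ q, w ∈ PySem.Str.split₀ r := by
  simp only [Bool.not_eq_eq_eq_not, Bool.not_true, List.isEmpty_eq_false_iff_exists_mem]
  constructor
  · rintro ⟨w, hw⟩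
    rw [PySem.Set.mem_inter] at hw
    exact ⟨w, (PySem.Set.mem_ofList _ _).1 hw.1, (PySem.Set.mem_ofList _ _).1 hw.2⟩
  · rintro ⟨w, h1, h2⟩
    exact ⟨w, (PySem.Set.mem_inter _ _ _).2
      ⟨(PySem.Set.mem_ofList _ _).2 h1, (PySem.Set.mem_ofList _ _).2 h2⟩⟩

theorem pvQwNonempty_iff (q : String) :
    (!(PySem.Set.ofList (PySem.Str.split₀ q)).isEmpty) = true ↔
      ∃ w, w ∈ PySem.Str.split₀ q := by
  simp only [Bool.not_eq_eq_eq_not, Bool.not_true, List.isEmpty_eq_false_iff_exists_mem]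
  constructor
  · rintro ⟨w, hw⟩; exact ⟨w, (PySem.Set.mem_ofList _ _).1 hw⟩
  · rintro ⟨w, hw⟩; exact ⟨w, (PySem.Set.mem_ofList _ _).2 hw⟩

-- A's loop returns true iff some road satisfies substring-or-word-overlap
theorem pvLoopA_iff (q : String) (roads : List String) :
    pvLoopA q roads = true ↔
      ∃ road ∈ roads, PySem.Str.isIn q (pvNormA road) = true ∨
        ∃ w ∈ PySem.Str.split₀ q, w ∈ PySem.Str.split₀ (pvNormA road) := by
  rw [pvLoopA_eq_any, List.any_eq_true]
  constructor
  · rintro ⟨road, hroad, hc⟩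
    refine ⟨road, hroad, ?_⟩
    unfold pvCondA at hc
    rw [Bool.or_eq_true, Bool.or_eq_true, Bool.and_eq_true] at hc
    rcases hc with (he | hs) | ⟨_, hi⟩
    · exact Or.inl (pvIsIn_of_eq _ _ (eq_of_beq he))
    · exact Or.inl hs
    · exact Or.inr ((pvInter_nonempty_iff _ _).1 hi)
  · rintro ⟨road, hroad, h⟩
    refine ⟨road, hroad, ?_⟩
    unfold pvCondA
    rw [Bool.or_eq_true, Bool.or_eq_true, Bool.and_eq_true]
    rcases h with h | ⟨w, h1, h2⟩
    · exact Or.inl (Or.inr h)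
    · exact Or.inr ⟨(pvQwNonempty_iff _).2 ⟨w, h1⟩,
        (pvInter_nonempty_iff _ _).2 ⟨w, h1, h2⟩⟩

-- B returns true iff the same condition holds
set_option maxHeartbeats 1000000 in
theorem pvAlt_iff (query : String) (roads : List String) :
    road_matches_py_alt query roads = true ↔
      ∃ road ∈ roads, PySem.Str.isIn (pvNormA query) (pvNormA road) = true ∨
        ∃ w ∈ PySem.Str.split₀ (pvNormA query), w ∈ PySem.Str.split₀ (pvNormA road) := by
  show (if ((roads.map pvNormB).any fun r => PySem.Str.isIn (pvNormB query) r) = true then true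
    else if (PySem.Set.ofList (PySem.Str.split₀ (pvNormB query))).isEmpty = true then false
    else !(PySem.Set.isdisjoint (PySem.Set.ofList (PySem.Str.split₀ (pvNormB query)))
      ((roads.map pvNormB).foldl (fun s r => PySem.Set.update s (PySem.Str.split₀ r))
        PySem.Set.empty))) = true ↔ _
  rw [pvIfOr, pvIfAnd, pvNormB_eq]
  rw [Bool.or_eq_true, Bool.and_eq_true, List.any_eq_true]
  constructor
  · rintro (⟨r, hr, hs⟩ | ⟨hq, hd⟩)
    · rw [List.mem_map] at hr
      rcases hr with ⟨road, hroad, rfl⟩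
      exact ⟨road, hroad, Or.inl hs⟩
    · rw [Bool.not_eq_true'] at hd
      rw [Bool.eq_false_iff, Ne, PySem.Set.isdisjoint_iff] at hd
      push Not at hd
      rcases hd with ⟨w, hw, hw2⟩
      rw [PySem.Set.mem_ofList] at hw
      rw [pvMem_foldl_update] at hw2
      rcases hw2 with h | ⟨r, hr, hwr⟩
      · simp [PySem.Set.empty] at h
      · rw [List.mem_map] at hr
        rcases hr with ⟨road, hroad, rfl⟩
        exact ⟨road, hroad, Or.inr ⟨w, hw, hwr⟩⟩
  · rintro ⟨road, hroad, h | ⟨w, h1, h2⟩⟩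
    · exact Or.inl ⟨pvNormA road, List.mem_map_of_mem hroad, h⟩
    · refine Or.inr ⟨?_, ?_⟩
      · rw [Bool.not_eq_true', List.isEmpty_eq_false_iff_exists_mem]
        exact ⟨w, (PySem.Set.mem_ofList _ _).2 h1⟩
      · rw [Bool.not_eq_true', Bool.eq_false_iff, Ne, PySem.Set.isdisjoint_iff]
        push Not
        exact ⟨w, (PySem.Set.mem_ofList _ _).2 h1,
          (pvMem_foldl_update _ _ _).2
            (Or.inr ⟨pvNormA road, List.mem_map_of_mem hroad, h2⟩)⟩

-- ===== VERDICT (by name: the statement is the Claim_ definition above) =====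
theorem road_matches_py_spec : Claim_equal_road_matches_py := by
  intro query roads _
  unfold Spec_road_matches_py road_matches_py
  rw [Bool.eq_iff_iff, pvLoopA_iff, pvAlt_iff]
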